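-- pv_equiv track=rewrite | github.com/yum08/nocho | scripts/apify_x_scraper.py | normalize_handle
-- ===== SOURCE A (Python) =====
-- def normalize_handle(handle: str) -> str:
--     """Normalize handle input — strip @, extract from URLs."""
--     handle = handle.strip()
--     for prefix in ('https://x.com/', 'https://twitter.com/', 'http://x.com/', 'http://twitter.com/',
--                     'x.com/', 'twitter.com/'):
--         if handle.lower().startswith(prefix.lower()):
--             handle = handle[len(prefix):].split('/')[0].split('?')[0]
--             break
--     if handle.startswith('@'):
--         handle = handle[1:]
--     return handle
-- ===== SOURCE B (Python) =====
-- def normalize_handle(handle: str) -> str: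
--     """Normalize handle input -- strip @, extract from URLs."""
--     s = handle.strip()
--     low = s.lower()
--     if low.startswith('https://'):
--         n = 8
--     elif low.startswith('http://'):
--         n = 7
--     else:
--         n = 0
--     if low.startswith('x.com/', n):
--         n += 6
--     elif low.startswith('twitter.com/', n):
--         n += 12
--     else:
--         n = -1
--     if n >= 0:
--         user = []
--         for c in s[n:]:
--             if c == '/' or c == '?':
--                 break
--             user.append(c)
--         s = ''.join(user)
--     if s.startswith('@'):
--         s = s[1:]
--     return s
-- ===== Notes on version B (the rewrite author's own statement) =====
-- stated objective: alternative
-- what changed: Replaces A's first-match loop over six lowercase URL prefixes and its slice-then-double-split chain with a scheme-then-domain two-step prefix decomposition and a single character scan that stops at the first path or query separator.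
import Mathlib
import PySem

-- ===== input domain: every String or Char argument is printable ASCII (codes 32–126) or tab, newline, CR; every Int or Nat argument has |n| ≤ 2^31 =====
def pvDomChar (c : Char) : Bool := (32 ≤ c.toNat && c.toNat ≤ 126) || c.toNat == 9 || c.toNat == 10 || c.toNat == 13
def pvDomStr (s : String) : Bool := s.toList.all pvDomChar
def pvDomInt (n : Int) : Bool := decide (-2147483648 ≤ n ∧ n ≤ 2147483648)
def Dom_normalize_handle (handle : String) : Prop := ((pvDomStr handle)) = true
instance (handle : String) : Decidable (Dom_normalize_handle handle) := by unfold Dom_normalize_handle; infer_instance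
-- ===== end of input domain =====

-- B rewrites A's six-prefix first-match loop as a scheme-then-domain decomposition with a single
-- break-on-'/'-or-'?' character scan replacing the slice/split/split chain (objective: alternative).

-- ===== PORT A =====
-- the tuple of URL prefixes A's for-loop iterates over, in order
def pvPrefixes : List (List Char) :=
  ["https://x.com/".toList, "https://twitter.com/".toList, "http://x.com/".toList,
   "http://twitter.com/".toList, "x.com/".toList, "twitter.com/".toList]

-- 'for prefix in (...): if handle.lower().startswith(prefix.lower()): handle = …; break'
-- as first-match recursion over the tuple; str.split never returns [], so Python's [0] is headD
def pvALoop (h : List Char) : List (List Char) → List Char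
  | [] => h
  | p :: ps =>
    if PySem.Chars.startswith (PySem.Chars.lower h) (PySem.Chars.lower p) then
      (PySem.Chars.splitOn
        ((PySem.Chars.splitOn (PySem.List.slice h (some (p.length : Int)) none) ['/']).headD [])
        ['?']).headD []
    else pvALoop h ps

def pvACore (h : List Char) : List Char :=
  let h2 := pvALoop h pvPrefixes
  if PySem.Chars.startswith h2 ['@'] then PySem.List.slice h2 (some 1) none else h2

def normalize_handle (handle : String) : String :=
  String.ofList (pvACore (PySem.Chars.strip handle.toList))

-- ===== PORT B =====
-- the 'for c in s[n:]: if c == '/' or c == '?': break; user.append(c)' loop of Source B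
def pvScan : List Char → List Char
  | [] => []
  | c :: cs => if c == '/' || c == '?' then [] else c :: pvScan cs

-- low.startswith(dom, n) is ported as startswith on low.drop n (exact: n is within bounds here)
def pvBCore (s : List Char) : List Char :=
  let low := PySem.Chars.lower s
  let n1 : Nat :=
    if PySem.Chars.startswith low "https://".toList then 8
    else if PySem.Chars.startswith low "http://".toList then 7
    else 0
  let n2 : Int :=
    if PySem.Chars.startswith (low.drop n1) "x.com/".toList then (n1 : Int) + 6
    else if PySem.Chars.startswith (low.drop n1) "twitter.com/".toList then (n1 : Int) + 12
    else -1
  let s1 := if 0 ≤ n2 then pvScan (s.drop n2.toNat) else s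
  if PySem.Chars.startswith s1 ['@'] then s1.drop 1 else s1

def normalize_handle_alt (handle : String) : String :=
  String.ofList (pvBCore (PySem.Chars.strip handle.toList))

-- ===== PRECONDITION & SPEC =====
def Spec_normalize_handle (handle : String) (out : String) : Prop := out = normalize_handle_alt handle
instance (handle : String) (out : String) : Decidable (Spec_normalize_handle handle out) := by unfold Spec_normalize_handle; infer_instance

-- ===== CLAIM (what is proved, stated in full; the proofs are below) =====
def Claim_equal_normalize_handle : Prop := ∀ (handle : String), Dom_normalize_handle handle → Spec_normalize_handle handle (normalize_handle handle)

-- ===== LEMMAS AND PROOFS =====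

-- splitOn.go's accumulator only prepends already-finished pieces
theorem pv_go_acc (sep : List Char) (fuel : Nat) (l cur : List Char) (acc : List (List Char)) :
    PySem.Chars.splitOn.go sep fuel l cur acc = acc.reverse ++ PySem.Chars.splitOn.go sep fuel l cur [] := by
  induction fuel generalizing l cur acc with
  | zero => simp [PySem.Chars.splitOn.go]
  | succ n ih =>
    cases l with
    | nil => simp [PySem.Chars.splitOn.go]
    | cons c rest =>
      simp only [PySem.Chars.splitOn.go]
      split_ifs with h
      · rw [ih _ _ (cur.reverse :: acc), ih _ _ ([cur.reverse])]
        simp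
      · exact ih _ _ _

theorem pv_go_head (c : Char) (fuel : Nat) (l cur : List Char) (h : l.length ≤ fuel) :
    (PySem.Chars.splitOn.go [c] fuel l cur []).headD [] =
      cur.reverse ++ l.takeWhile (fun x => !(x == c)) := by
  induction fuel generalizing l cur with
  | zero =>
    have hl : l = [] := by cases l <;> simp_all
    subst hl; simp [PySem.Chars.splitOn.go]
  | succ n ih =>
    cases l with
    | nil => simp [PySem.Chars.splitOn.go]
    | cons x rest =>
      simp only [PySem.Chars.splitOn.go]
      split_ifs with hp
      · have hx : x = c := by simp [List.isPrefixOf] at hp; exact hp.symm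
        rw [pv_go_acc]
        simp [hx]
      · have hx : (x == c) = false := by
          simp [List.isPrefixOf] at hp; simp; exact fun e => hp e.symm
        rw [ih rest (x :: cur) (by simpa using Nat.le_of_succ_le_succ h)]
        simp [hx]

-- s.split(sep)[0] is the longest sep-free prefix
theorem pv_splitOn_head (s : List Char) (c : Char) :
    (PySem.Chars.splitOn s [c]).headD [] = s.takeWhile (fun x => !(x == c)) := by
  have := pv_go_head c (s.length + 1) s [] (by omega)
  simpa [PySem.Chars.splitOn] using this

-- A's split('/')[0].split('?')[0] chain equals B's break-on-'/'-or-'?' scan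
theorem pv_extract_eq (l : List Char) :
    (PySem.Chars.splitOn ((PySem.Chars.splitOn l ['/']).headD []) ['?']).headD [] = pvScan l := by
  rw [pv_splitOn_head, pv_splitOn_head, List.takeWhile_takeWhile]
  induction l with
  | nil => simp [pvScan]
  | cons x xs ih =>
    by_cases hx : x = '/' <;> by_cases hq : x = '?' <;>
      simp_all [pvScan]

-- the shared final '@'-strip step
theorem pv_at_step (h2 : List Char) :
    (if PySem.Chars.startswith h2 ['@'] then PySem.List.slice h2 (some 1) none else h2) =
      (if PySem.Chars.startswith h2 ['@'] then h2.drop 1 else h2) := by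
  have h := PySem.List.slice_from_natCast h2 1
  norm_num at h
  simp [h, List.drop_one]

theorem pv_core_eq (s : List Char) : pvACore s = pvBCore s := by
  have lit1 : PySem.Chars.lower "https://x.com/".toList = "https://x.com/".toList := by decide
  have lit2 : PySem.Chars.lower "https://twitter.com/".toList = "https://twitter.com/".toList := by decide
  have lit3 : PySem.Chars.lower "http://x.com/".toList = "http://x.com/".toList := by decide
  have lit4 : PySem.Chars.lower "http://twitter.com/".toList = "http://twitter.com/".toList := by decide
  have lit5 : PySem.Chars.lower "x.com/".toList = "x.com/".toList := by decide
  have lit6 : PySem.Chars.lower "twitter.com/".toList = "twitter.com/".toList := by decide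
  have L1 : ("https://x.com/".toList.length : Int) = ((14:Nat):Int) := by decide
  have L2 : ("https://twitter.com/".toList.length : Int) = ((20:Nat):Int) := by decide
  have L3 : ("http://x.com/".toList.length : Int) = ((13:Nat):Int) := by decide
  have L4 : ("http://twitter.com/".toList.length : Int) = ((19:Nat):Int) := by decide
  have L5 : ("x.com/".toList.length : Int) = ((6:Nat):Int) := by decide
  have L6 : ("twitter.com/".toList.length : Int) = ((12:Nat):Int) := by decide
  by_cases h1 : PySem.Chars.startswith (PySem.Chars.lower s) "https://x.com/".toList = true
  · obtain ⟨r, hr⟩ := (PySem.Chars.startswith_iff _ _).1 h1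
    simp only [pvACore, pvBCore, pvPrefixes, pvALoop, lit1, lit2, lit3, lit4, lit5, lit6,
      L1, L2, L3, L4, L5, L6, PySem.List.slice_from_natCast, pv_extract_eq]
    rw [pv_at_step, ← hr]
    simp [PySem.Chars.startswith, List.isPrefixOf]
  by_cases h2c : PySem.Chars.startswith (PySem.Chars.lower s) "https://twitter.com/".toList = true
  · obtain ⟨r, hr⟩ := (PySem.Chars.startswith_iff _ _).1 h2c
    simp only [pvACore, pvBCore, pvPrefixes, pvALoop, lit1, lit2, lit3, lit4, lit5, lit6,
      L1, L2, L3, L4, L5, L6, PySem.List.slice_from_natCast, pv_extract_eq]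
    rw [pv_at_step, ← hr]
    simp [PySem.Chars.startswith, List.isPrefixOf]
  by_cases h3 : PySem.Chars.startswith (PySem.Chars.lower s) "http://x.com/".toList = true
  · obtain ⟨r, hr⟩ := (PySem.Chars.startswith_iff _ _).1 h3
    simp only [pvACore, pvBCore, pvPrefixes, pvALoop, lit1, lit2, lit3, lit4, lit5, lit6,
      L1, L2, L3, L4, L5, L6, PySem.List.slice_from_natCast, pv_extract_eq]
    rw [pv_at_step, ← hr]
    simp [PySem.Chars.startswith, List.isPrefixOf]
  by_cases h4 : PySem.Chars.startswith (PySem.Chars.lower s) "http://twitter.com/".toList = true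
  · obtain ⟨r, hr⟩ := (PySem.Chars.startswith_iff _ _).1 h4
    simp only [pvACore, pvBCore, pvPrefixes, pvALoop, lit1, lit2, lit3, lit4, lit5, lit6,
      L1, L2, L3, L4, L5, L6, PySem.List.slice_from_natCast, pv_extract_eq]
    rw [pv_at_step, ← hr]
    simp [PySem.Chars.startswith, List.isPrefixOf]
  by_cases h5 : PySem.Chars.startswith (PySem.Chars.lower s) "x.com/".toList = true
  · obtain ⟨r, hr⟩ := (PySem.Chars.startswith_iff _ _).1 h5
    simp only [pvACore, pvBCore, pvPrefixes, pvALoop, lit1, lit2, lit3, lit4, lit5, lit6,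
      L1, L2, L3, L4, L5, L6, PySem.List.slice_from_natCast, pv_extract_eq]
    rw [pv_at_step, ← hr]
    simp [PySem.Chars.startswith, List.isPrefixOf]
  by_cases h6 : PySem.Chars.startswith (PySem.Chars.lower s) "twitter.com/".toList = true
  · obtain ⟨r, hr⟩ := (PySem.Chars.startswith_iff _ _).1 h6
    simp only [pvACore, pvBCore, pvPrefixes, pvALoop, lit1, lit2, lit3, lit4, lit5, lit6,
      L1, L2, L3, L4, L5, L6, PySem.List.slice_from_natCast, pv_extract_eq]
    rw [pv_at_step, ← hr]
    simp [PySem.Chars.startswith, List.isPrefixOf]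
  -- no prefix matches: A keeps the stripped handle; show B's domain checks fail too
  · simp [PySem.Chars.startswith] at h1 h2c h3 h4 h5 h6
    have hA : pvALoop s pvPrefixes = s := by
      simp only [pvPrefixes, pvALoop, lit1, lit2, lit3, lit4, lit5, lit6, PySem.Chars.startswith]
      simp [h1, h2c, h3, h4, h5, h6]
    by_cases s8 : PySem.Chars.startswith (PySem.Chars.lower s) "https://".toList = true
    · obtain ⟨r, hr⟩ := (PySem.Chars.startswith_iff _ _).1 s8
      rw [← hr] at h1 h2c
      simp at h1 h2c
      simp only [pvACore, pvBCore, hA]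
      rw [pv_at_step, ← hr]
      simp [PySem.Chars.startswith, List.isPrefixOf, h1, h2c]
    by_cases s7 : PySem.Chars.startswith (PySem.Chars.lower s) "http://".toList = true
    · obtain ⟨r, hr⟩ := (PySem.Chars.startswith_iff _ _).1 s7
      rw [← hr] at h3 h4
      simp at h3 h4
      simp only [pvACore, pvBCore, hA]
      rw [pv_at_step, ← hr]
      simp [PySem.Chars.startswith, List.isPrefixOf, h3, h4]
    · simp [PySem.Chars.startswith] at s8 s7
      simp only [pvACore, pvBCore, hA]
      rw [pv_at_step]
      simp [PySem.Chars.startswith, h5, h6, s8, s7]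

-- ===== VERDICT (by name: the statement is the Claim_ definition above) =====
theorem normalize_handle_spec : Claim_equal_normalize_handle := by
  intro handle _
  unfold Spec_normalize_handle normalize_handle normalize_handle_alt
  rw [pv_core_eq]
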